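-- pv_equiv track=rewrite | github.com/LCS2-IIITD/idt-analysis | Scripts/author_init.py | get_all_authors
-- ===== SOURCE A (Python) =====
-- def get_all_authors(line):
-- 	authors = set()
-- 	author_name = False
-- 	author_main_name = ""
-- 	for s in line:
-- 		if s == '[':
-- 			author_name = True
-- 		if author_name:
-- 			author_main_name += s
-- 		if s == ']':
-- 			authors.add(author_main_name)
-- 			author_main_name = ""
-- 			author_name = False
--
-- 	return authors
-- ===== SOURCE B (Python) =====
-- def bracket_tag(piece):
--     """The author tag '[...]' closed by the ']' that ended this piece, or '' if it was never opened."""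
--     idx = piece.find('[')
--     return piece[idx:] + ']' if idx >= 0 else ''
--
-- def get_all_authors(line):
--     return {bracket_tag(piece) for piece in line.split(']')[:-1]}
-- ===== Notes on version B (the rewrite author's own statement) =====
-- stated objective: faster
-- what changed: Replaced the character-by-character capture state machine with a set comprehension over the segments produced by splitting at closing brackets, mapping each segment to the tag starting at its first opening bracket (the empty tag for an unopened one).
import Mathlib
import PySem

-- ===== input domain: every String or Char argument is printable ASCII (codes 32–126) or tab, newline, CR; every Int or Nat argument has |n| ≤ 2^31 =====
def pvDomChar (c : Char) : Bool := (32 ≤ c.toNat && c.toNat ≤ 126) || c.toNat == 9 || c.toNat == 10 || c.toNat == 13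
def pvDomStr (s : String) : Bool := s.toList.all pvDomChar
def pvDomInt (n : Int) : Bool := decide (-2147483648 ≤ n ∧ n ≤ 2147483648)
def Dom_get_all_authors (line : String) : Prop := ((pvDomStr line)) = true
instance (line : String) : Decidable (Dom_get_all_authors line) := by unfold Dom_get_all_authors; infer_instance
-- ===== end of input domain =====

-- B replaces A's character-level capture state machine by a set comprehension over the
-- ']'-separated segments, each mapped to the tag from its first '[' (same O(n), measurably faster constants).


-- ===== PORT A =====
-- one step of A's for-loop; state = (authors, author_name, author_main_name as chars)
def gaaStepA (st : PySem.Set String × Bool × List Char) (s : Char) :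
    PySem.Set String × Bool × List Char :=
  let authors := st.1
  let name := if s = '[' then true else st.2.1
  let cur := if name then st.2.2 ++ [s] else st.2.2
  if s = ']' then (PySem.Set.add authors (String.ofList cur), false, [])
  else (authors, name, cur)

def get_all_authors (line : String) : List String :=
  (line.toList.foldl gaaStepA (PySem.Set.empty, false, [])).1

-- ===== PORT B =====
-- bracket_tag: the tag from the piece's first '[' through the closing ']', or '' if never opened
def bracketTag (piece : String) : String :=
  let idx := PySem.Str.find piece "["
  if 0 ≤ idx then String.ofList (PySem.List.slice piece.toList (some idx) none ++ [']'])
  else ""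

def get_all_authors_alt (line : String) : List String :=
  match PySem.Str.split? line "]" with
  | some segments => PySem.Set.ofList (segments.dropLast.map bracketTag)
  | none => []

-- ===== PRECONDITION & SPEC =====
def Spec_get_all_authors (line : String) (out : List String) : Prop := out = get_all_authors_alt line
instance (line : String) (out : List String) : Decidable (Spec_get_all_authors line out) := by unfold Spec_get_all_authors; infer_instance

-- ===== CLAIM (what is proved, stated in full; the proofs are below) =====
def Claim_equal_get_all_authors : Prop := ∀ (line : String), Dom_get_all_authors line → Spec_get_all_authors line (get_all_authors line)

-- ===== LEMMAS AND PROOFS =====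

-- structural split on a single separator character (proof-side characterisation of split)
def splitc (c : Char) : List Char → List (List Char)
  | [] => [[]]
  | x :: xs => if x = c then [] :: splitc c xs else (splitc c xs).modifyHead (x :: ·)

-- the segments that precede a ']' (what B maps over, on the char level)
def piecesc (cs : List Char) : List (List Char) := (splitc ']' cs).dropLast

theorem splitc_ne_nil (c : Char) (l : List Char) : splitc c l ≠ [] := by
  cases l with
  | nil => simp [splitc]
  | cons x xs =>
    simp only [splitc]
    split_ifs
    · simp
    · cases h : splitc c xs with
      | nil => exact absurd h (splitc_ne_nil c xs)
      | cons a as => simp [List.modifyHead]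

theorem splitOn_go_single (c : Char) (l : List Char) : ∀ (fuel : Nat) (cur : List Char)
    (acc : List (List Char)), l.length ≤ fuel →
    PySem.Chars.splitOn.go [c] fuel l cur acc
      = acc.reverse ++ (splitc c l).modifyHead (cur.reverse ++ ·) := by
  induction l with
  | nil =>
    intro fuel cur acc _
    cases fuel <;> simp [PySem.Chars.splitOn.go, splitc]
  | cons x xs ih =>
    intro fuel cur acc hf
    cases fuel with
    | zero => simp at hf
    | succ f =>
      have hf' : xs.length ≤ f := by simp at hf; omega
      rw [PySem.Chars.splitOn.go]
      by_cases hx : x = c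
      · subst hx
        rw [if_pos (by simp [List.isPrefixOf])]
        simp only [List.length_singleton, List.drop_succ_cons, List.drop_zero]
        rw [ih f [] (cur.reverse :: acc) hf']
        cases h : splitc x xs <;> simp [splitc, h, List.modifyHead]
      · rw [if_neg (by simp [List.isPrefixOf]; exact fun hh => hx hh.symm)]
        rw [ih f (x :: cur) acc hf']
        cases h : splitc c xs with
        | nil => simp [splitc, hx, h, List.modifyHead]
        | cons p ps => simp [splitc, hx, h, List.modifyHead]

theorem splitOn_single (c : Char) (s : List Char) :
    PySem.Chars.splitOn s [c] = splitc c s := by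
  rw [PySem.Chars.splitOn]
  rw [splitOn_go_single c s (s.length + 1) [] [] (by omega)]
  cases h : splitc c s with
  | nil => exact absurd h (splitc_ne_nil c s)
  | cons p ps => simp [List.modifyHead]

theorem find_go_single (c : Char) (s : List Char) : ∀ (k : Nat),
    PySem.Chars.find.go [c] s k = match PySem.List.index? s c with
      | some i => ((k + i : Nat) : Int)
      | none => -1 := by
  induction s with
  | nil => intro k; rw [PySem.Chars.find.go]; simp [PySem.List.index?]
  | cons x xs ih =>
    intro k
    rw [PySem.Chars.find.go]
    by_cases hx : c = x
    · subst hx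
      rw [if_pos (by simp [List.isPrefixOf])]
      rw [PySem.List.index?_cons_self]
      simp
    · rw [if_neg (by simp [List.isPrefixOf]; exact hx)]
      rw [ih (k+1), show PySem.List.index? (x :: xs) c = (PySem.List.index? xs c).map (· + 1)
        from PySem.List.index?_cons_of_ne xs (show x ≠ c from fun h => hx h.symm)]
      cases h : PySem.List.index? xs c with
      | none => simp
      | some i => simp; ring

theorem find_single (c : Char) (s : List Char) :
    PySem.Chars.find s [c] = match PySem.List.index? s c with
      | some i => (i : Int)
      | none => -1 := by
  rw [PySem.Chars.find, find_go_single]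
  cases h : PySem.List.index? s c <;> simp

-- char-level version of what A adds when the ']' closing a piece is reached
def fA (p : List Char) : String :=
  match PySem.List.index? p '[' with
  | some i => String.ofList (p.drop i ++ [']'])
  | none => ""

theorem fA_cons_ne (x : Char) (p : List Char) (h : x ≠ '[') : fA (x :: p) = fA p := by
  rw [fA, fA, PySem.List.index?_cons_of_ne p h]
  cases hi : PySem.List.index? p '[' <;> simp

theorem fA_cons_open (p : List Char) : fA ('[' :: p) = String.ofList ('[' :: (p ++ [']'])) := by
  rw [fA, PySem.List.index?_cons_self]
  simp

theorem piecesc_sep (cs : List Char) : piecesc (']' :: cs) = [] :: piecesc cs := by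
  rw [piecesc, piecesc, splitc, if_pos rfl]
  cases h : splitc ']' cs with
  | nil => exact absurd h (splitc_ne_nil ']' cs)
  | cons p ps => simp

theorem piecesc_cons_ne (x : Char) (cs : List Char) (h : x ≠ ']') :
    piecesc (x :: cs) = (piecesc cs).modifyHead (x :: ·) := by
  rw [piecesc, piecesc, splitc, if_neg h]
  cases hs : splitc ']' cs with
  | nil => exact absurd hs (splitc_ne_nil ']' cs)
  | cons p ps =>
    cases ps with
    | nil => simp [List.modifyHead]
    | cons q qs => simp [List.modifyHead]

-- invariant of A's loop: from state (authors, false, []) resp. (authors, true, cur),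
-- the final author set is the fold over the pieces before each ']', adding fA
theorem main_loop (cs : List Char) :
    (∀ (authors : PySem.Set String),
      (cs.foldl gaaStepA (authors, false, [])).1
        = (piecesc cs).foldl (fun a p => PySem.Set.add a (fA p)) authors)
    ∧ (∀ (authors : PySem.Set String) (cur : List Char),
      (cs.foldl gaaStepA (authors, true, cur)).1
        = match piecesc cs with
          | [] => authors
          | p :: ps => ps.foldl (fun a q => PySem.Set.add a (fA q))
              (PySem.Set.add authors (String.ofList (cur ++ p ++ [']'])))) := by
  induction cs with
  | nil =>
    constructor
    · intro authors; simp [piecesc, splitc]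
    · intro authors cur; simp [piecesc, splitc]
  | cons x rest ih =>
    constructor
    · intro authors
      by_cases hxs : x = ']'
      · subst hxs
        rw [List.foldl_cons]
        rw [show gaaStepA (authors, false, []) ']'
            = (PySem.Set.add authors (String.ofList []), false, []) from by
          simp [gaaStepA]]
        rw [ih.1, piecesc_sep, List.foldl_cons]
        rw [show fA [] = "" from by decide]
      · by_cases hxo : x = '['
        · subst hxo
          rw [List.foldl_cons]
          rw [show gaaStepA (authors, false, []) '[' = (authors, true, ['[']) from by
            simp [gaaStepA]]
          rw [ih.2, piecesc_cons_ne _ _ hxs]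
          cases h : piecesc rest with
          | nil => simp
          | cons p ps =>
            simp only [List.modifyHead, List.foldl_cons]
            rw [fA_cons_open]
            simp
        · rw [List.foldl_cons]
          rw [show gaaStepA (authors, false, []) x = (authors, false, []) from by
            simp [gaaStepA, hxs, hxo]]
          rw [ih.1, piecesc_cons_ne _ _ hxs]
          cases h : piecesc rest with
          | nil => simp
          | cons p ps =>
            simp only [List.modifyHead, List.foldl_cons]
            rw [fA_cons_ne _ _ hxo]
    · intro authors cur
      by_cases hxs : x = ']'
      · subst hxs
        rw [List.foldl_cons]
        rw [show gaaStepA (authors, true, cur) ']'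
            = (PySem.Set.add authors (String.ofList (cur ++ [']'])), false, []) from by
          simp [gaaStepA]]
        rw [ih.1, piecesc_sep]
        simp
      · rw [List.foldl_cons]
        rw [show gaaStepA (authors, true, cur) x = (authors, true, cur ++ [x]) from by
          simp [gaaStepA, hxs]]
        rw [ih.2, piecesc_cons_ne _ _ hxs]
        cases h : piecesc rest with
        | nil => simp
        | cons p ps =>
          simp only [List.modifyHead]
          simp

theorem bracketTag_ofList (p : List Char) : bracketTag (String.ofList p) = fA p := by
  rw [bracketTag, fA]
  simp only [PySem.Str.find_eq, String.toList_ofList]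
  rw [show "[".toList = ['['] from rfl, find_single]
  cases h : PySem.List.index? p '[' with
  | none => simp
  | some i =>
    simp only []
    rw [if_pos (by positivity)]
    rw [PySem.List.slice_from_natCast]

theorem split?_str (line : String) :
    PySem.Str.split? line "]" = some ((splitc ']' line.toList).map String.ofList) := by
  have h := PySem.Str.split?_map line "]"
  rw [show "]".toList = [']'] from rfl] at h
  rw [PySem.Chars.split?, if_neg (by simp)] at h
  rw [splitOn_single] at h
  cases hs : PySem.Str.split? line "]" with
  | none => rw [hs] at h; simp at h
  | some segs =>
    rw [hs] at h
    simp only [Option.map_some, Option.some.injEq] at h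
    congr 1
    rw [← h]
    rw [List.map_map]
    simp [Function.comp_def]

theorem alt_eq_fold (line : String) :
    get_all_authors_alt line
      = (piecesc line.toList).foldl (fun a p => PySem.Set.add a (fA p)) PySem.Set.empty := by
  rw [get_all_authors_alt, split?_str]
  show PySem.Set.ofList (((splitc ']' line.toList).map String.ofList).dropLast.map bracketTag) = _
  rw [show (((splitc ']' line.toList).map String.ofList).dropLast)
      = (piecesc line.toList).map String.ofList from by
    rw [piecesc, List.map_dropLast]]
  rw [List.map_map, PySem.Set.ofList_eq_foldl, List.foldl_map]
  apply PySem.List.foldl_congr_mem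
  intro a p _
  rw [Function.comp_apply, bracketTag_ofList]

-- ===== VERDICT (by name: the statement is the Claim_ definition above) =====
theorem get_all_authors_spec : Claim_equal_get_all_authors := by
  intro line _
  unfold Spec_get_all_authors
  rw [get_all_authors, alt_eq_fold, (main_loop line.toList).1]
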